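-- pv_equiv track=rewrite | github.com/fxz729/CrimeJournal | backend/app/services/slug.py | _get_country
-- ===== SOURCE A (Python) =====
-- COURT_COUNTRY_MAP = {
--     # United States
--     "ca": "us",   # Federal circuits: ca1-ca11, etc.
--     "cae": "us",  # Court of Appeals for the Federal Circuit
--     "dcd": "us",  # DC District
--     "dca": "us",  # DC Circuit / DC Court of Appeals
--     "mad": "us",  # Massachusetts District
--     "ny": "us",   # New York (state and federal)
--     "cal": "us",  # California Supreme Court / Courts
--     "penn": "us", # Pennsylvania
--     "tex": "us",  # Texas
--     "fl": "us",   # Florida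
--     "ill": "us",  # Illinois
--     # Add more as needed
-- }
--
-- def _get_country(court_id: str) -> str:
--     """
--     Infer country from court ID.
--
--     CourtListener primarily covers US courts.
--     """
--     if not court_id:
--         return "us"
--
--     court_lower = court_id.lower()
--
--     # Check against known patterns
--     for prefix, country in COURT_COUNTRY_MAP.items():
--         if court_lower.startswith(prefix):
--             return country
--
--     # Check for international court patterns
--     if court_lower.startswith("ew"):
--         return "de"  # Germany (europäische justiz)
--     if court_lower.startswith("uk"):
--         return "uk"  # United Kingdom
--     if court_lower in ["can", "bc", "ontario"]:
--         return "ca"  # Canada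
--
--     # Default to US (CourtListener is primarily US-focused)
--     return "us"
-- ===== SOURCE B (Python) =====
-- def _get_country(court_id: str) -> str:
--     # Every COURT_COUNTRY_MAP entry maps to "us", and "us" is also the default,
--     # so no table is needed: only the international patterns matter.  Note that
--     # "can" is shadowed by the "ca" prefix in A and therefore yields "us" here too.
--     cl = court_id.lower()
--     if cl.startswith("ew"):
--         return "de"
--     if cl.startswith("uk"):
--         return "uk"
--     if cl == "bc" or cl == "ontario":
--         return "ca"
--     return "us"
-- ===== Notes on version B (the rewrite author's own statement) =====
-- stated objective: simpler
-- what changed: B drops the all-'us' lookup table and its prefix-scan loop entirely and uses four direct guards on the lowercased id (ew->de, uk->uk, bc/ontario->ca, else us); 'can' is deliberately absent from the Canada set because A's 'ca' prefix shadows it and returns 'us'.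
import Mathlib
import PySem

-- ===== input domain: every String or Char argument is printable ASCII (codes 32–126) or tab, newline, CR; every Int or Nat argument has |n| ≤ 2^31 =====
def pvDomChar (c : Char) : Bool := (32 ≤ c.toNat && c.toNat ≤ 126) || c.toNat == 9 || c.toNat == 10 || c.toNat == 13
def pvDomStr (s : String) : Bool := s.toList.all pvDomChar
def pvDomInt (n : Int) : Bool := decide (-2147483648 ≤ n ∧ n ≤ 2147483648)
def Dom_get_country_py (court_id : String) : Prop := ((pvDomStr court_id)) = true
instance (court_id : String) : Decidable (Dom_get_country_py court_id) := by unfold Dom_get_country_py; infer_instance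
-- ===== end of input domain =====

-- B replaces A's scan of the all-"us" COURT_COUNTRY_MAP table with four direct
-- guards on the lowercased court id (simpler; no data structure, no loop).


-- ===== PORT A =====
def courtCountryMap : PySem.Dict String String :=
  PySem.Dict.ofList [("ca", "us"), ("cae", "us"), ("dcd", "us"), ("dca", "us"),
    ("mad", "us"), ("ny", "us"), ("cal", "us"), ("penn", "us"), ("tex", "us"),
    ("fl", "us"), ("ill", "us")]

-- the 'for prefix, country in COURT_COUNTRY_MAP.items(): if startswith: return country' loop
def courtLoop (cl : String) : List (String × String) → Option String
  | [] => none
  | (p, c) :: rest => if PySem.Str.startswith cl p then some c else courtLoop cl rest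

def get_country_py (court_id : String) : String :=
  if court_id = "" then "us"
  else
    let court_lower := PySem.Str.lower court_id
    match courtLoop court_lower courtCountryMap.items with
    | some country => country
    | none =>
      if PySem.Str.startswith court_lower "ew" then "de"
      else if PySem.Str.startswith court_lower "uk" then "uk"
      else if ["can", "bc", "ontario"].contains court_lower then "ca"
      else "us"

-- ===== PORT B =====
def get_country_py_alt (court_id : String) : String :=
  let cl := PySem.Str.lower court_id
  if PySem.Str.startswith cl "ew" then "de"
  else if PySem.Str.startswith cl "uk" then "uk"
  else if cl = "bc" ∨ cl = "ontario" then "ca"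
  else "us"

-- ===== PRECONDITION & SPEC =====
def Spec_get_country_py (court_id : String) (out : String) : Prop := out = get_country_py_alt court_id
instance (court_id : String) (out : String) : Decidable (Spec_get_country_py court_id out) := by unfold Spec_get_country_py; infer_instance

-- ===== CLAIM (what is proved, stated in full; the proofs are below) =====
def Claim_equal_get_country_py : Prop := ∀ (court_id : String), Dom_get_country_py court_id → Spec_get_country_py court_id (get_country_py court_id)

-- ===== LEMMAS AND PROOFS =====

-- a string starting with (c :: p) has head c
theorem pvSwHead {l : List Char} {c : Char} {p : List Char}
    (h : PySem.Chars.startswith l (c :: p) = true) : l.head? = some c := by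
  obtain ⟨t, ht⟩ := (PySem.Chars.startswith_iff _ _).mp h
  rw [← ht]; rfl

-- B returns "us" whenever the lowered id starts with a letter other than e/u/b/o
theorem pvAltUs (court_id : String) {c : Char} {p : List Char}
    (h : PySem.Chars.startswith (PySem.Chars.lower court_id.toList) (c :: p) = true)
    (he : c ≠ 'e') (hu : c ≠ 'u') (hb : c ≠ 'b') (ho : c ≠ 'o') :
    get_country_py_alt court_id = "us" := by
  have hh := pvSwHead h
  have h1 : PySem.Chars.startswith (PySem.Chars.lower court_id.toList) ['e', 'w'] = false := by
    cases hx : PySem.Chars.startswith (PySem.Chars.lower court_id.toList) ['e', 'w'] with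
    | false => rfl
    | true =>
      exfalso
      have hy := pvSwHead hx
      rw [hh] at hy
      exact he (by simpa using hy)
  have h2 : PySem.Chars.startswith (PySem.Chars.lower court_id.toList) ['u', 'k'] = false := by
    cases hx : PySem.Chars.startswith (PySem.Chars.lower court_id.toList) ['u', 'k'] with
    | false => rfl
    | true =>
      exfalso
      have hy := pvSwHead hx
      rw [hh] at hy
      exact hu (by simpa using hy)
  have h3 : ¬ (PySem.Str.lower court_id = "bc" ∨ PySem.Str.lower court_id = "ontario") := by
    rintro (hx | hx)
    · have ht := congrArg String.toList hx
      simp at ht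
      rw [ht] at hh
      exact hb (by simpa using hh.symm)
    · have ht := congrArg String.toList hx
      simp at ht
      rw [ht] at hh
      exact ho (by simpa using hh.symm)
  simp [get_country_py_alt, h1, h2, h3]

theorem pvItems : courtCountryMap.items = [("ca", "us"), ("cae", "us"), ("dcd", "us"),
    ("dca", "us"), ("mad", "us"), ("ny", "us"), ("cal", "us"), ("penn", "us"),
    ("tex", "us"), ("fl", "us"), ("ill", "us")] := by decide

-- ===== VERDICT (by name: the statement is the Claim_ definition above) =====
theorem get_country_py_spec : Claim_equal_get_country_py := by
  intro court_id _
  unfold Spec_get_country_py get_country_py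
  by_cases h0 : court_id = ""
  · subst h0; simp; decide
  rw [if_neg h0, pvItems]
  by_cases h1 : PySem.Str.startswith (PySem.Str.lower court_id) "ca" = true
  · simp only [courtLoop, h1, if_true]
    exact (pvAltUs court_id (c := 'c') (p := ['a']) (by simpa using h1)
      (by decide) (by decide) (by decide) (by decide)).symm
  by_cases h2 : PySem.Str.startswith (PySem.Str.lower court_id) "cae" = true
  · simp only [courtLoop, h1, h2, if_true, if_false, Bool.false_eq_true]
    exact (pvAltUs court_id (c := 'c') (p := ['a','e']) (by simpa using h2)
      (by decide) (by decide) (by decide) (by decide)).symm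
  by_cases h3 : PySem.Str.startswith (PySem.Str.lower court_id) "dcd" = true
  · simp only [courtLoop, h1, h2, h3, if_true, if_false, Bool.false_eq_true]
    exact (pvAltUs court_id (c := 'd') (p := ['c','d']) (by simpa using h3)
      (by decide) (by decide) (by decide) (by decide)).symm
  by_cases h4 : PySem.Str.startswith (PySem.Str.lower court_id) "dca" = true
  · simp only [courtLoop, h1, h2, h3, h4, if_true, if_false, Bool.false_eq_true]
    exact (pvAltUs court_id (c := 'd') (p := ['c','a']) (by simpa using h4)
      (by decide) (by decide) (by decide) (by decide)).symm
  by_cases h5 : PySem.Str.startswith (PySem.Str.lower court_id) "mad" = true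
  · simp only [courtLoop, h1, h2, h3, h4, h5, if_true, if_false, Bool.false_eq_true]
    exact (pvAltUs court_id (c := 'm') (p := ['a','d']) (by simpa using h5)
      (by decide) (by decide) (by decide) (by decide)).symm
  by_cases h6 : PySem.Str.startswith (PySem.Str.lower court_id) "ny" = true
  · simp only [courtLoop, h1, h2, h3, h4, h5, h6, if_true, if_false, Bool.false_eq_true]
    exact (pvAltUs court_id (c := 'n') (p := ['y']) (by simpa using h6)
      (by decide) (by decide) (by decide) (by decide)).symm
  by_cases h7 : PySem.Str.startswith (PySem.Str.lower court_id) "cal" = true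
  · simp only [courtLoop, h1, h2, h3, h4, h5, h6, h7, if_true, if_false, Bool.false_eq_true]
    exact (pvAltUs court_id (c := 'c') (p := ['a','l']) (by simpa using h7)
      (by decide) (by decide) (by decide) (by decide)).symm
  by_cases h8 : PySem.Str.startswith (PySem.Str.lower court_id) "penn" = true
  · simp only [courtLoop, h1, h2, h3, h4, h5, h6, h7, h8, if_true, if_false, Bool.false_eq_true]
    exact (pvAltUs court_id (c := 'p') (p := ['e','n','n']) (by simpa using h8)
      (by decide) (by decide) (by decide) (by decide)).symm
  by_cases h9 : PySem.Str.startswith (PySem.Str.lower court_id) "tex" = true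
  · simp only [courtLoop, h1, h2, h3, h4, h5, h6, h7, h8, h9, if_true, if_false, Bool.false_eq_true]
    exact (pvAltUs court_id (c := 't') (p := ['e','x']) (by simpa using h9)
      (by decide) (by decide) (by decide) (by decide)).symm
  by_cases h10 : PySem.Str.startswith (PySem.Str.lower court_id) "fl" = true
  · simp only [courtLoop, h1, h2, h3, h4, h5, h6, h7, h8, h9, h10, if_true, if_false, Bool.false_eq_true]
    exact (pvAltUs court_id (c := 'f') (p := ['l']) (by simpa using h10)
      (by decide) (by decide) (by decide) (by decide)).symm
  by_cases h11 : PySem.Str.startswith (PySem.Str.lower court_id) "ill" = true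
  · simp only [courtLoop, h1, h2, h3, h4, h5, h6, h7, h8, h9, h10, h11, if_true, if_false, Bool.false_eq_true]
    exact (pvAltUs court_id (c := 'i') (p := ['l','l']) (by simpa using h11)
      (by decide) (by decide) (by decide) (by decide)).symm
  -- loop found nothing: A's tail equals B
  have hcan : PySem.Str.lower court_id ≠ "can" := by
    intro hx; exact h1 (by rw [hx]; decide)
  simp only [courtLoop, h1, h2, h3, h4, h5, h6, h7, h8, h9, h10, h11,
    if_false, Bool.false_eq_true]
  by_cases hew : PySem.Chars.startswith (PySem.Chars.lower court_id.toList) ['e', 'w'] = true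
  · simp [get_country_py_alt, hew]
  by_cases huk : PySem.Chars.startswith (PySem.Chars.lower court_id.toList) ['u', 'k'] = true
  · simp [get_country_py_alt, hew, huk]
  simp [get_country_py_alt, hew, huk, hcan]
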